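-- pv_equiv track=rewrite | github.com/bluelovers/sd-webui-pnginfo-injection | sd_webui_pnginfo_injection/utils.py | overwrite_sort_dict_by_prefixes_in_place
-- ===== SOURCE A (Python) =====
-- def overwrite_sort_dict_by_prefixes_in_place(d, prefixes):
--     # 提取带有指定前缀的键及其顺序
--     prefixed_keys = {prefix: [] for prefix in prefixes}
--     other_keys = []
--
--     for key in list(d.keys()):
--         matched = False
--         for prefix in prefixes:
--             if key.startswith(prefix):
--                 prefixed_keys[prefix].append(key)
--                 matched = True
--                 break
--         if not matched:
--             other_keys.append(key)
--
--     # 将 prefixed_keys 中的键按照前缀顺序重新插入到字典中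
--     for prefix in prefixes:
--         for key in prefixed_keys[prefix]:
--             d[key] = d.pop(key)
--
--     # 保持其他键的原有顺序
--     for key in other_keys:
--         d[key] = d.pop(key)
--
--     return d
-- ===== SOURCE B (Python) =====
-- def overwrite_sort_dict_by_prefixes_in_place(d, prefixes):
--     n = len(prefixes)
--     pos = {}
--     for i, p in enumerate(prefixes):
--         pos[p] = i
--
--     def rank(key):
--         for p in prefixes:
--             if key.startswith(p):
--                 return pos[p]
--         return n
--
--     for key in sorted(list(d), key=rank):
--         d[key] = d.pop(key)
--     return d
-- ===== Notes on version B (the rewrite author's own statement) =====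
-- stated objective: simpler
-- what changed: Replaces A's three passes (a per-prefix grouping dict, an unmatched-keys list, and nested per-prefix reinsertion loops) by one stable sort of the keys under a rank function (position of the key's first matching prefix, unmatched last) followed by a single pop/reinsert loop.
import Mathlib
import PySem

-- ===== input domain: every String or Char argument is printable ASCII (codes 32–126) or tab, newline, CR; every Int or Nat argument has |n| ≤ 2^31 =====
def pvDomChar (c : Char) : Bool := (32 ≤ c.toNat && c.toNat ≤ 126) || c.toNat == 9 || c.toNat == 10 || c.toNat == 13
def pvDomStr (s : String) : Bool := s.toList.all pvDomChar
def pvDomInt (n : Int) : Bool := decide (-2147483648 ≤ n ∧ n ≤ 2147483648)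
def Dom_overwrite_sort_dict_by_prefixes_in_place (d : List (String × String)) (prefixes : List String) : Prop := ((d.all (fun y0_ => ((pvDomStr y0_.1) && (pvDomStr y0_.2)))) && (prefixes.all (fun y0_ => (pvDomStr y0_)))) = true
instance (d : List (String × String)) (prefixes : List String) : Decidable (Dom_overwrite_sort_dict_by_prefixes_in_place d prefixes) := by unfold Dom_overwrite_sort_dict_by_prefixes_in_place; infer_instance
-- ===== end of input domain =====

-- B replaces A's grouping dict + unmatched list + nested reinsertion loops by one stable
-- sort of the keys under a rank (the position of the key's first matching prefix, unmatched
-- keys last) followed by one pop/reinsert loop (objective: simpler).  The Python function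
-- mutates d in place; B performs the same mutation, and the equivalence proved here is
-- about the returned dict.

-- ===== PORT A =====
-- A's inner 'for prefix in prefixes: if key.startswith(prefix): …; matched = True; break'
def pvFirstPrefix (prefixes : List String) (key : String) : Option String :=
  match prefixes with
  | [] => none
  | p :: ps => if PySem.Str.startswith key p then some p else pvFirstPrefix ps key

-- body of A's first loop: append key to its group, or to other_keys if no prefix matched
def pvGroupStep (prefixes : List String)
    (st : PySem.Dict String (List String) × List String) (key : String) :
    PySem.Dict String (List String) × List String :=
  match pvFirstPrefix prefixes key with
  | some p => (st.1.modify p [] (fun g => g ++ [key]), st.2)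
  | none => (st.1, st.2 ++ [key])

-- 'd[key] = d.pop(key)' (a line both Pythons share); on a missing key Python raises
-- KeyError — unreachable here, every moved key is a key of the dict it is popped from.
def pvMoveToEnd (dd : PySem.Dict String String) (key : String) : PySem.Dict String String :=
  match dd.pop? key with
  | some (v, dd') => dd'.insert key v
  | none => dd

def overwrite_sort_dict_by_prefixes_in_place (d : List (String × String)) (prefixes : List String) : List (String × String) :=
  let dd : PySem.Dict String String := PySem.Dict.ofList d
  -- prefixed_keys = {prefix: [] for prefix in prefixes}
  let prefixed_keys : PySem.Dict String (List String) :=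
    prefixes.foldl (fun acc p => acc.insert p []) PySem.Dict.empty
  -- for key in list(d.keys()): …
  let st := dd.keys.foldl (pvGroupStep prefixes) (prefixed_keys, [])
  -- for prefix in prefixes: for key in prefixed_keys[prefix]: d[key] = d.pop(key)
  let dd1 := prefixes.foldl (fun acc p => (st.1.getD p []).foldl pvMoveToEnd acc) dd
  -- for key in other_keys: d[key] = d.pop(key)
  (st.2.foldl pvMoveToEnd dd1).items

-- ===== PORT B =====
-- B's 'pos = {}; for i, p in enumerate(prefixes): pos[p] = i'
def pvPosDict (prefixes : List String) : PySem.Dict String Int :=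
  (PySem.List.enumerate prefixes).foldl (fun acc ip => acc.insert ip.2 ip.1) PySem.Dict.empty

-- B's 'def rank(key): for p in prefixes: if key.startswith(p): return pos[p]; return n'
-- (pos[p]: a KeyError is impossible — p ∈ prefixes, so p is a key of pos; getD is exact there)
def pvRank (pos : PySem.Dict String Int) (n : Int) (prefixes : List String) (key : String) : Int :=
  match prefixes with
  | [] => n
  | p :: ps => if PySem.Str.startswith key p then pos.getD p 0 else pvRank pos n ps key

def overwrite_sort_dict_by_prefixes_in_place_alt (d : List (String × String)) (prefixes : List String) : List (String × String) :=
  let dd : PySem.Dict String String := PySem.Dict.ofList d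
  let n : Int := (prefixes.length : Int)
  let pos := pvPosDict prefixes
  -- for key in sorted(list(d), key=rank): d[key] = d.pop(key)
  let sortedKeys := PySem.List.sorted dd.keys (pvRank pos n prefixes)
  (sortedKeys.foldl pvMoveToEnd dd).items

-- ===== PRECONDITION & SPEC =====
def Spec_overwrite_sort_dict_by_prefixes_in_place (d : List (String × String)) (prefixes : List String) (out : List (String × String)) : Prop := out = overwrite_sort_dict_by_prefixes_in_place_alt d prefixes
instance (d : List (String × String)) (prefixes : List String) (out : List (String × String)) : Decidable (Spec_overwrite_sort_dict_by_prefixes_in_place d prefixes out) := by unfold Spec_overwrite_sort_dict_by_prefixes_in_place; infer_instance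

-- ===== CLAIM (what is proved, stated in full; the proofs are below) =====
def Claim_equal_overwrite_sort_dict_by_prefixes_in_place : Prop := ∀ (d : List (String × String)) (prefixes : List String), Dom_overwrite_sort_dict_by_prefixes_in_place d prefixes → Spec_overwrite_sort_dict_by_prefixes_in_place d prefixes (overwrite_sort_dict_by_prefixes_in_place d prefixes)

-- ===== LEMMAS AND PROOFS =====

-- first-match bookkeeping ---------------------------------------------------

theorem pvFirstPrefix_mem (ps : List String) (k p : String)
    (h : pvFirstPrefix ps k = some p) : p ∈ ps := by
  induction ps with
  | nil => simp [pvFirstPrefix] at h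
  | cons q ps ih =>
    simp only [pvFirstPrefix] at h
    split at h
    · cases h; simp
    · exact List.mem_cons_of_mem q (ih h)

theorem pvRank_eq_match (pos : PySem.Dict String Int) (n : Int) (ps : List String)
    (key : String) :
    pvRank pos n ps key
      = (match pvFirstPrefix ps key with
         | some p => pos.getD p 0
         | none => n) := by
  induction ps with
  | nil => simp [pvRank, pvFirstPrefix]
  | cons p ps ih =>
    simp only [pvRank, pvFirstPrefix]
    split
    · rfl
    · exact ih

-- the position dict maps each prefix to its LAST index ----------------------

theorem pvPosDict_snoc (l : List String) (x : String) :
    pvPosDict (l ++ [x]) = (pvPosDict l).insert x (l.length : Int) := by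
  unfold pvPosDict
  rw [PySem.List.enumerate_append, List.foldl_append]
  simp

theorem pvPosDict_last (l : List String) (p : String) (hp : p ∈ l) :
    ∃ j, ∃ (hj : j < l.length),
      (pvPosDict l).get? p = some (j : Int) ∧ l[j] = p ∧ p ∉ l.drop (j + 1) := by
  induction l using List.reverseRecOn with
  | nil => simp at hp
  | append_singleton l x ih =>
    rw [pvPosDict_snoc]
    by_cases hx : p = x
    · subst hx
      refine ⟨l.length, by simp, ?_, by simp, ?_⟩
      · rw [PySem.Dict.get?_insert_self]
      · rw [List.drop_eq_nil_of_le (by simp)]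
        simp
    · have hpl : p ∈ l := by
        rcases List.mem_append.mp hp with h | h
        · exact h
        · simp at h; exact absurd h hx
      obtain ⟨j, hj, hget, hel, hdrop⟩ := ih hpl
      refine ⟨j, by simp; omega, ?_, ?_, ?_⟩
      · rw [PySem.Dict.get?_insert_of_ne _ _ hx, hget]
      · rw [List.getElem_append_left hj]; exact hel
      · rw [List.drop_append_of_le_length (by omega)]
        intro hmem
        rcases List.mem_append.mp hmem with h | h
        · exact hdrop h
        · simp at h; exact hx h

theorem mem_drop_of_getElem (l : List String) (j j' : Nat) (hlt : j < j')
    (hj' : j' < l.length) : l[j'] ∈ l.drop (j + 1) := by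
  have hlen : j' - (j + 1) < (l.drop (j + 1)).length := by
    rw [List.length_drop]; omega
  have hmem := List.getElem_mem hlen
  rw [List.getElem_drop] at hmem
  have hidx : l[j + 1 + (j' - (j + 1))] = l[j'] := by
    congr 1; omega
  rwa [hidx] at hmem

theorem last_idx_unique (l : List String) (p : String) (j j' : Nat)
    (hj : j < l.length) (hj' : j' < l.length)
    (h1 : l[j] = p) (h2 : p ∉ l.drop (j + 1))
    (h3 : l[j'] = p) (h4 : p ∉ l.drop (j' + 1)) : j = j' := by
  rcases lt_trichotomy j j' with h | h | h
  · exact absurd (h3 ▸ mem_drop_of_getElem l j j' h hj') h2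
  · exact h
  · exact absurd (h1 ▸ mem_drop_of_getElem l j' j h hj) h4

-- the stable sort of B lays out the groups of equal rank in increasing order --

theorem insertBy_append_not_before {α : Type} (before : α → α → Bool) (x : α) :
    ∀ (A B : List α), (∀ a ∈ A, before x a = false) →
      PySem.List.insertBy before x (A ++ B) = A ++ PySem.List.insertBy before x B := by
  intro A
  induction A with
  | nil => intro B _; simp
  | cons a A ih =>
    intro B h
    have ha : before x a = false := h a (by simp)
    simp only [List.cons_append, PySem.List.insertBy, ha, Bool.false_eq_true, if_false]
    rw [ih B (fun a' ha' => h a' (by simp [ha']))]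

theorem insertBy_all_before {α : Type} (before : α → α → Bool) (x : α) :
    ∀ (B : List α), (∀ b ∈ B, before x b = true) →
      PySem.List.insertBy before x B = x :: B := by
  intro B h
  cases B with
  | nil => simp [PySem.List.insertBy]
  | cons b bs => simp [PySem.List.insertBy, h b (by simp)]

theorem pv_flatMap_congr {α β : Type} {l : List α} {f g : α → List β}
    (h : ∀ a ∈ l, f a = g a) : l.flatMap f = l.flatMap g := by
  induction l with
  | nil => rfl
  | cons a l ih =>
    rw [List.flatMap_cons, List.flatMap_cons, h a (by simp),
      ih (fun a' ha' => h a' (by simp [ha']))]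

theorem sorted_groups_int {α : Type} (key : α → Int) :
    ∀ (xs : List α) (n : Nat), (∀ x ∈ xs, 0 ≤ key x ∧ key x ≤ (n : Int)) →
      PySem.List.sorted xs key =
        (List.range (n + 1)).flatMap (fun (i : Nat) => xs.filter (fun x => key x == (i : Int))) := by
  intro xs
  induction xs using List.reverseRecOn with
  | nil => intro n h; simp [PySem.List.sorted_eq_foldl_insertBy]
  | append_singleton ys x ih =>
    intro n h
    have hys : ∀ y ∈ ys, 0 ≤ key y ∧ key y ≤ (n : Int) := fun y hy => h y (by simp [hy])
    obtain ⟨hx0, hxn⟩ := h x (by simp)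
    obtain ⟨m, hm⟩ := Int.eq_ofNat_of_zero_le hx0
    have hmn : m ≤ n := by omega
    rw [PySem.List.sorted_eq_foldl_insertBy, List.foldl_append, List.foldl_cons,
      List.foldl_nil, ← PySem.List.sorted_eq_foldl_insertBy, ih n hys]
    have hsplit : n + 1 = (m + 1) + (n - m) := by omega
    set P := (List.range m).flatMap (fun (i : Nat) => ys.filter (fun y => key y == (i : Int))) with hP
    set Q := ((List.range (n - m)).map (fun i => m + 1 + i)).flatMap
        (fun (i : Nat) => ys.filter (fun y => key y == (i : Int))) with hQ
    have hL : (List.range (n + 1)).flatMap (fun (i : Nat) => ys.filter (fun y => key y == (i : Int)))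
        = (P ++ ys.filter (fun y => key y == (m : Int))) ++ Q := by
      rw [hsplit, List.range_add, List.flatMap_append, List.range_succ,
        List.flatMap_append, List.flatMap_singleton]
    have hR : (List.range (n + 1)).flatMap (fun (i : Nat) => (ys ++ [x]).filter (fun y => key y == (i : Int)))
        = (P ++ (ys.filter (fun y => key y == (m : Int)) ++ [x])) ++ Q := by
      rw [hsplit, List.range_add, List.flatMap_append, List.range_succ,
        List.flatMap_append, List.flatMap_singleton]
      have h1 : (List.range m).flatMap (fun (i : Nat) => (ys ++ [x]).filter (fun y => key y == (i : Int))) = P := by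
        rw [hP]
        refine pv_flatMap_congr (fun i hi => ?_)
        have hilt : i < m := List.mem_range.mp hi
        rw [List.filter_append]
        have : (key x == (i : Int)) = false := by
          rw [beq_eq_false_iff_ne]; omega
        simp [this]
      have h2 : (ys ++ [x]).filter (fun y => key y == (m : Int))
          = ys.filter (fun y => key y == (m : Int)) ++ [x] := by
        rw [List.filter_append]
        have : (key x == (m : Int)) = true := beq_iff_eq.mpr hm
        simp [this]
      have h3 : ((List.range (n - m)).map (fun i => m + 1 + i)).flatMap
          (fun (i : Nat) => (ys ++ [x]).filter (fun y => key y == (i : Int))) = Q := by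
        rw [hQ]
        refine pv_flatMap_congr (fun i hi => ?_)
        obtain ⟨j, hj, rfl⟩ := List.mem_map.mp hi
        rw [List.filter_append]
        simp
        omega
      rw [h1, h2, h3]
    rw [hL, hR]
    have hPle : ∀ a ∈ P ++ ys.filter (fun y => key y == (m : Int)), key a ≤ key x := by
      intro a ha
      rcases List.mem_append.mp ha with ha | ha
      · rw [hP] at ha
        obtain ⟨i, hi, hmem⟩ := List.mem_flatMap.mp ha
        have h2 := beq_iff_eq.mp (List.mem_filter.mp hmem).2
        have h3 := List.mem_range.mp hi
        omega
      · have h2 := beq_iff_eq.mp (List.mem_filter.mp ha).2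
        omega
    have hQgt : ∀ a ∈ Q, key x < key a := by
      intro a ha
      rw [hQ] at ha
      obtain ⟨i, hi, hmem⟩ := List.mem_flatMap.mp ha
      obtain ⟨j, hj, rfl⟩ := List.mem_map.mp hi
      have h2 := beq_iff_eq.mp (List.mem_filter.mp hmem).2
      have h4 : ((m + 1 + j : Nat) : Int) = (m : Int) + 1 + j := by push_cast; ring
      rw [h4] at h2
      omega
    rw [insertBy_append_not_before _ x _ Q
        (fun a ha => by simp [Int.not_lt.mpr (hPle a ha)]),
      insertBy_all_before _ x Q (fun a ha => by simp [hQgt a ha])]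
    simp

-- last-occurrence deduplication ---------------------------------------------

def pvDedupLast : List String → List String
  | [] => []
  | k :: L => if k ∈ L then pvDedupLast L else k :: pvDedupLast L

theorem mem_pvDedupLast (x : String) : ∀ (L : List String), x ∈ pvDedupLast L ↔ x ∈ L := by
  intro L
  induction L with
  | nil => simp [pvDedupLast]
  | cons k L ih =>
    simp only [pvDedupLast]
    split
    · rename_i hk
      rw [ih]
      constructor
      · exact fun h => List.mem_cons_of_mem k h
      · intro h
        rcases List.mem_cons.mp h with h | h
        · exact h ▸ hk
        · exact h
    · simp [ih]

theorem nodup_pvDedupLast : ∀ (L : List String), (pvDedupLast L).Nodup := by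
  intro L
  induction L with
  | nil => simp [pvDedupLast]
  | cons k L ih =>
    simp only [pvDedupLast]
    split
    · exact ih
    · rename_i hk
      exact List.nodup_cons.mpr ⟨fun h => hk ((mem_pvDedupLast k L).mp h), ih⟩

theorem pvDedupLast_of_nodup : ∀ (L : List String), L.Nodup → pvDedupLast L = L := by
  intro L
  induction L with
  | nil => intro _; rfl
  | cons k L ih =>
    intro h
    obtain ⟨hk, hL⟩ := List.nodup_cons.mp h
    simp only [pvDedupLast, hk, if_false]
    rw [ih hL]

theorem pvDedupLast_append_subset : ∀ (X Y : List String), (∀ x ∈ X, x ∈ Y) →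
    pvDedupLast (X ++ Y) = pvDedupLast Y := by
  intro X
  induction X with
  | nil => intro Y _; rfl
  | cons x X ih =>
    intro Y h
    have hx : x ∈ X ++ Y := List.mem_append.mpr (Or.inr (h x (by simp)))
    simp only [List.cons_append, pvDedupLast, hx, if_true]
    exact ih Y (fun x' hx' => h x' (by simp [hx']))

theorem pvDedupLast_append_disjoint : ∀ (X Y : List String), (∀ x ∈ X, x ∉ Y) →
    pvDedupLast (X ++ Y) = pvDedupLast X ++ pvDedupLast Y := by
  intro X
  induction X with
  | nil => intro Y _; rfl
  | cons x X ih =>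
    intro Y h
    have hx : (x ∈ X ++ Y) ↔ (x ∈ X) := by
      rw [List.mem_append]
      exact ⟨fun hc => hc.resolve_right (h x (by simp)), Or.inl⟩
    simp only [List.cons_append, pvDedupLast]
    by_cases hmem : x ∈ X
    · rw [if_pos (hx.mpr hmem), if_pos hmem, ih Y (fun x' hx' => h x' (by simp [hx']))]
    · rw [if_neg (fun hc => hmem (hx.mp hc)), if_neg hmem,
        ih Y (fun x' hx' => h x' (by simp [hx']))]
      rfl

theorem pvDedupLast_snoc : ∀ (L : List String) (k : String),
    pvDedupLast (L ++ [k]) = (pvDedupLast L).filter (fun x => !(x == k)) ++ [k] := by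
  intro L
  induction L with
  | nil => intro k; simp [pvDedupLast]
  | cons j L ih =>
    intro k
    simp only [List.cons_append, pvDedupLast]
    by_cases hjL : j ∈ L
    · rw [if_pos (by simp [hjL]), ih k, if_pos hjL]
    · by_cases hjk : j = k
      · rw [if_pos (by simp [hjk]), ih k, if_neg hjL]
        subst hjk
        simp [List.filter_cons]
      · rw [if_neg (by simp [hjL, hjk]), ih k, if_neg hjL]
        simp [List.filter_cons, hjk]

theorem pvDedupLast_flatMap (G : String → List String)
    (hdisj : ∀ q q', q ≠ q' → ∀ k, k ∈ G q → k ∉ G q')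
    (hnod : ∀ q, (G q).Nodup) :
    ∀ (ps : List String), pvDedupLast (ps.flatMap G) = (pvDedupLast ps).flatMap G := by
  intro ps
  induction ps with
  | nil => rfl
  | cons q ps ih =>
    rw [List.flatMap_cons]
    simp only [pvDedupLast]
    by_cases hq : q ∈ ps
    · rw [if_pos hq, pvDedupLast_append_subset _ _ (fun x hx =>
        List.mem_flatMap.mpr ⟨q, hq, hx⟩), ih]
    · rw [if_neg hq, pvDedupLast_append_disjoint _ _ (fun x hx hc => by
        obtain ⟨q', hq', hx'⟩ := List.mem_flatMap.mp hc
        exact hdisj q' q (fun he => hq (he ▸ hq')) x hx' hx),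
        pvDedupLast_of_nodup _ (hnod q), ih, List.flatMap_cons]

-- the pop/reinsert fold, characterised at the items level --------------------

theorem foldl_move_items (dd : PySem.Dict String String) (hnd : dd.keys.Nodup) :
    ∀ (L : List String), (∀ k ∈ L, k ∈ dd.keys) →
      (L.foldl pvMoveToEnd dd).items =
        dd.items.filter (fun p => !(L.contains p.1))
          ++ (pvDedupLast L).map (fun k => (k, dd.getD k "")) := by
  intro L
  induction L using List.reverseRecOn with
  | nil => simp [pvDedupLast]
  | append_singleton L x ih =>
    intro hmem
    have hL : ∀ k ∈ L, k ∈ dd.keys := fun k hk => hmem k (by simp [hk])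
    have hx : x ∈ dd.keys := hmem x (by simp)
    rw [List.foldl_append, List.foldl_cons, List.foldl_nil]
    set E := L.foldl pvMoveToEnd dd with hE
    set F := dd.items.filter (fun p => !(L.contains p.1)) with hF
    set D := pvDedupLast L with hD
    have hitems : E.items = F ++ D.map (fun k => (k, dd.getD k "")) := ih hL
    have hkeysE : E.keys = F.map Prod.fst ++ D := by
      simp only [PySem.Dict.keys, hitems, List.map_append, List.map_map]
      have hcomp : ((fun (x : String × String) => x.1) ∘ fun k => (k, dd.getD k "")) = id := rfl
      rw [hcomp, List.map_id]
    have hndE : E.keys.Nodup := by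
      rw [hkeysE]
      refine List.Nodup.append ?_ (nodup_pvDedupLast L) ?_
      · exact (List.Sublist.map Prod.fst List.filter_sublist).nodup hnd
      · intro a haF haD
        have haL : a ∈ L := (mem_pvDedupLast a L).mp haD
        obtain ⟨p, hp, rfl⟩ := List.mem_map.mp haF
        have := (List.mem_filter.mp hp).2
        simp [haL] at this
    have hget : E.get? x = some (dd.getD x "") := by
      by_cases hxL : x ∈ L
      · refine PySem.Dict.get?_of_mem_items E ?_ hndE
        rw [hitems]
        exact List.mem_append.mpr (Or.inr (List.mem_map.mpr
          ⟨x, (mem_pvDedupLast x L).mpr hxL, rfl⟩))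
      · obtain ⟨p, hp, hpx⟩ := List.mem_map.mp hx
        have hpF : p ∈ F := by
          rw [hF, List.mem_filter]
          exact ⟨hp, by simp [hpx, hxL]⟩
        have hgd : dd.getD x "" = p.2 := by
          have : (x, p.2) ∈ dd.items := by rwa [show (x, p.2) = p by
            rw [← hpx]]
          exact PySem.Dict.getD_of_mem_items dd this hnd ""
        rw [hgd]
        refine PySem.Dict.get?_of_mem_items E ?_ hndE
        rw [hitems]
        refine List.mem_append.mpr (Or.inl ?_)
        rwa [show (x, p.2) = p by rw [← hpx]]
    have hmove : pvMoveToEnd E x = (E.erase x).insert x (dd.getD x "") := by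
      unfold pvMoveToEnd
      rw [PySem.Dict.pop?, hget]
      rfl
    have hcerase : (E.erase x).contains x = false := by
      simp only [PySem.Dict.contains, PySem.Dict.erase]
      rw [List.any_eq_false]
      intro p hp
      have := (List.mem_filter.mp hp).2
      simpa using this
    rw [hmove, PySem.Dict.items_insert_of_not_contains _ _ hcerase]
    have herase : (E.erase x).items = E.items.filter (fun p => !(p.1 == x)) := rfl
    rw [herase, hitems, List.filter_append]
    have hFpart : F.filter (fun p => !(p.1 == x))
        = dd.items.filter (fun p => !((L ++ [x]).contains p.1)) := by
      rw [hF, List.filter_filter]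
      refine List.filter_congr (fun p _ => ?_)
      by_cases h1 : p.1 = x <;> by_cases h2 : p.1 ∈ L <;> simp [h1, h2]
    have hGpart : (D.map (fun k => (k, dd.getD k ""))).filter (fun p => !(p.1 == x))
        = (D.filter (fun k => !(k == x))).map (fun k => (k, dd.getD k "")) := by
      rw [List.filter_map]
      rfl
    rw [hFpart, hGpart, pvDedupLast_snoc, List.map_append]
    simp [hD]

-- A's concatenated move list, and its agreement with B's sorted key list -----

theorem pk0_getD (ps : List String) :
    ∀ (acc : PySem.Dict String (List String)),
      (∀ q, acc.getD q [] = []) →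
      ∀ p, (ps.foldl (fun acc p => acc.insert p []) acc).getD p [] = [] := by
  induction ps with
  | nil => intro acc h p; exact h p
  | cons q ps ih =>
    intro acc h p
    refine ih _ (fun r => ?_) p
    rw [PySem.Dict.getD_insert]
    split
    · rfl
    · exact h r

theorem groups_fst (prefixes : List String) (ks : List String) :
    ∀ (acc : PySem.Dict String (List String)) (oth : List String) (p : String),
      ((ks.foldl (pvGroupStep prefixes) (acc, oth)).1).getD p []
        = acc.getD p [] ++ ks.filter (fun k => pvFirstPrefix prefixes k == some p) := by
  induction ks with
  | nil => intro acc oth p; simp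
  | cons k ks ih =>
    intro acc oth p
    rw [List.foldl_cons, List.filter_cons]
    cases hfp : pvFirstPrefix prefixes k with
    | none =>
      rw [show pvGroupStep prefixes (acc, oth) k = (acc, oth ++ [k]) by
        simp [pvGroupStep, hfp]]
      rw [ih acc (oth ++ [k]) p]
      simp
    | some q =>
      rw [show pvGroupStep prefixes (acc, oth) k
            = (acc.modify q [] (fun g => g ++ [k]), oth) by
        simp [pvGroupStep, hfp]]
      rw [ih _ oth p, PySem.Dict.getD_modify]
      by_cases hpq : p = q
      · subst hpq; simp
      · have : (some q == some p) = false := by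
          simp only [beq_eq_false_iff_ne, ne_eq, Option.some.injEq]
          exact fun hc => hpq hc.symm
        simp [hpq, this]

theorem groups_snd (prefixes : List String) (ks : List String) :
    ∀ (acc : PySem.Dict String (List String)) (oth : List String),
      (ks.foldl (pvGroupStep prefixes) (acc, oth)).2
        = oth ++ ks.filter (fun k => (pvFirstPrefix prefixes k).isNone) := by
  induction ks with
  | nil => intro acc oth; simp
  | cons k ks ih =>
    intro acc oth
    rw [List.foldl_cons, List.filter_cons]
    cases hfp : pvFirstPrefix prefixes k with
    | none =>
      rw [show pvGroupStep prefixes (acc, oth) k = (acc, oth ++ [k]) by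
        simp [pvGroupStep, hfp]]
      rw [ih _ (oth ++ [k])]
      simp
    | some q =>
      rw [show pvGroupStep prefixes (acc, oth) k
            = (acc.modify q [] (fun g => g ++ [k]), oth) by
        simp [pvGroupStep, hfp]]
      rw [ih _ oth]
      simp

theorem foldl_nested_eq_flatMap {α β : Type} (f : β → α → β) (G : String → List α) :
    ∀ (ps : List String) (b : β),
      ps.foldl (fun acc p => (G p).foldl f acc) b = (ps.flatMap G).foldl f b := by
  intro ps
  induction ps with
  | nil => intro b; simp
  | cons p ps ih => intro b; simp [List.foldl_append, ih]

-- rank-group ↔ first-match-group correspondence ------------------------------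

theorem rank_group_eq (prefixes : List String) (k : String) (j : Nat)
    (hj : j < prefixes.length) :
    (pvRank (pvPosDict prefixes) (prefixes.length : Int) prefixes k == (j : Int))
      = if prefixes[j] ∈ prefixes.drop (j + 1) then false
        else (pvFirstPrefix prefixes k == some prefixes[j]) := by
  cases hfp : pvFirstPrefix prefixes k with
  | none =>
    simp only [pvRank_eq_match, hfp]
    have : ((prefixes.length : Int) == (j : Int)) = false := by
      rw [beq_eq_false_iff_ne]
      intro hc
      have : prefixes.length = j := by exact_mod_cast hc
      omega
    simp only [this]
    split <;> simp
  | some p =>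
    simp only [pvRank_eq_match, hfp]
    have hpmem := pvFirstPrefix_mem prefixes k p hfp
    obtain ⟨jp, hjp, hget, hel, hdrop⟩ := pvPosDict_last prefixes p hpmem
    rw [PySem.Dict.getD_of_get?_eq_some _ 0 hget]
    by_cases hrep : prefixes[j] ∈ prefixes.drop (j + 1)
    · rw [if_pos hrep, beq_eq_false_iff_ne]
      intro hc
      have hjj : jp = j := by exact_mod_cast hc
      subst hjj
      exact hdrop (by rw [hel] at hrep; exact hrep)
    · rw [if_neg hrep]
      by_cases hpq : p = prefixes[j]
      · have hjj : jp = j :=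
          last_idx_unique prefixes p jp j hjp hj hel hdrop hpq.symm
            (by rw [hpq]; exact hrep)
        subst hjj
        simp [hpq]
      · have h1 : ((jp : Int) == (j : Int)) = false := by
          rw [beq_eq_false_iff_ne]
          intro hc
          have hjj : jp = j := by exact_mod_cast hc
          refine hpq ?_
          rw [← hel]
          congr 1
        have h2 : (some p == some prefixes[j]) = false := by
          simp [hpq]
        rw [h1, h2]

theorem rank_top_iff_none (prefixes : List String) (k : String) :
    (pvRank (pvPosDict prefixes) (prefixes.length : Int) prefixes k
        == (prefixes.length : Int))
      = (pvFirstPrefix prefixes k).isNone := by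
  cases hfp : pvFirstPrefix prefixes k with
  | none => simp [pvRank_eq_match, hfp]
  | some p =>
    simp only [pvRank_eq_match, hfp]
    have hpmem := pvFirstPrefix_mem prefixes k p hfp
    obtain ⟨jp, hjp, hget, _, _⟩ := pvPosDict_last prefixes p hpmem
    rw [PySem.Dict.getD_of_get?_eq_some _ 0 hget]
    simp only [Option.isNone_some]
    rw [beq_eq_false_iff_ne]
    intro hc
    have : jp = prefixes.length := by exact_mod_cast hc
    omega

theorem rank_bounds (prefixes : List String) (k : String) :
    0 ≤ pvRank (pvPosDict prefixes) (prefixes.length : Int) prefixes k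
      ∧ pvRank (pvPosDict prefixes) (prefixes.length : Int) prefixes k
          ≤ (prefixes.length : Int) := by
  cases hfp : pvFirstPrefix prefixes k with
  | none => constructor <;> simp [pvRank_eq_match, hfp]
  | some p =>
    simp only [pvRank_eq_match, hfp]
    have hpmem := pvFirstPrefix_mem prefixes k p hfp
    obtain ⟨jp, hjp, hget, _, _⟩ := pvPosDict_last prefixes p hpmem
    rw [PySem.Dict.getD_of_get?_eq_some _ 0 hget]
    constructor
    · exact Int.natCast_nonneg jp
    · exact_mod_cast Nat.le_of_lt hjp

theorem range'_rank_groups (prefixes : List String) (ks : List String) :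
    ∀ (qs : List String) (j : Nat), qs = prefixes.drop j →
      (List.range' j qs.length).flatMap
          (fun (i : Nat) => ks.filter
            (fun k => pvRank (pvPosDict prefixes) (prefixes.length : Int) prefixes k == (i : Int)))
        = (pvDedupLast qs).flatMap
            (fun p => ks.filter (fun k => pvFirstPrefix prefixes k == some p)) := by
  intro qs
  induction qs with
  | nil => intro j h; simp [pvDedupLast]
  | cons q qs ih =>
    intro j h
    have hj : j < prefixes.length := by
      by_contra hc
      rw [List.drop_eq_nil_of_le (by omega)] at h
      exact List.cons_ne_nil q qs h
    have hdec := List.drop_eq_getElem_cons hj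
    have h2 := h.trans hdec
    injection h2 with hq' hqs
    have hq : prefixes[j] = q := hq'.symm
    rw [List.length_cons, List.range'_succ, List.flatMap_cons, ih (j + 1) hqs]
    simp only [pvDedupLast]
    by_cases hrep : q ∈ qs
    · have hrep' : prefixes[j] ∈ prefixes.drop (j + 1) := by
        rw [← hqs, hq]; exact hrep
      rw [if_pos hrep]
      have hnil : ks.filter
          (fun k => pvRank (pvPosDict prefixes) (prefixes.length : Int) prefixes k == (j : Int)) = [] := by
        rw [List.filter_eq_nil_iff]
        intro k _
        rw [rank_group_eq prefixes k j hj, if_pos hrep']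
        simp
      rw [hnil, List.nil_append]
    · have hrep' : prefixes[j] ∉ prefixes.drop (j + 1) := by
        rw [← hqs, hq]; exact hrep
      rw [if_neg hrep, List.flatMap_cons]
      congr 1
      refine List.filter_congr (fun k _ => ?_)
      rw [rank_group_eq prefixes k j hj, if_neg hrep', hq]

-- assembly --------------------------------------------------------------------

theorem key_order_eq (prefixes : List String) (ks : List String) (hnd : ks.Nodup) :
    pvDedupLast
        (prefixes.flatMap (fun p => ks.filter (fun k => pvFirstPrefix prefixes k == some p))
          ++ ks.filter (fun k => (pvFirstPrefix prefixes k).isNone))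
      = PySem.List.sorted ks
          (pvRank (pvPosDict prefixes) (prefixes.length : Int) prefixes) := by
  have hdisj : ∀ x ∈ prefixes.flatMap
      (fun p => ks.filter (fun k => pvFirstPrefix prefixes k == some p)),
      x ∉ ks.filter (fun k => (pvFirstPrefix prefixes k).isNone) := by
    intro x hx hc
    obtain ⟨p, _, hxf⟩ := List.mem_flatMap.mp hx
    have h1 := beq_iff_eq.mp (List.mem_filter.mp hxf).2
    have h2 := (List.mem_filter.mp hc).2
    rw [h1] at h2
    simp at h2
  rw [pvDedupLast_append_disjoint _ _ hdisj,
    pvDedupLast_of_nodup _ (hnd.filter _),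
    pvDedupLast_flatMap _
      (fun q q' hne k hk hk' => by
        have h1 := beq_iff_eq.mp (List.mem_filter.mp hk).2
        have h2 := beq_iff_eq.mp (List.mem_filter.mp hk').2
        rw [h1] at h2
        exact hne (Option.some.injEq _ _ ▸ h2))
      (fun q => hnd.filter _)]
  rw [sorted_groups_int _ ks prefixes.length (fun k _ => rank_bounds prefixes k),
    List.range_succ, List.flatMap_append, List.flatMap_singleton]
  have htop : ks.filter
      (fun k => pvRank (pvPosDict prefixes) (prefixes.length : Int) prefixes k
        == ((prefixes.length : Nat) : Int))
      = ks.filter (fun k => (pvFirstPrefix prefixes k).isNone) :=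
    List.filter_congr (fun k _ => rank_top_iff_none prefixes k)
  rw [htop, List.range_eq_range']
  rw [range'_rank_groups prefixes ks prefixes 0 (by simp)]

-- ===== VERDICT (by name: the statement is the Claim_ definition above) =====
theorem overwrite_sort_dict_by_prefixes_in_place_spec : Claim_equal_overwrite_sort_dict_by_prefixes_in_place := by
  intro d prefixes _
  unfold Spec_overwrite_sort_dict_by_prefixes_in_place
  unfold overwrite_sort_dict_by_prefixes_in_place overwrite_sort_dict_by_prefixes_in_place_alt
  have hpk : ∀ p, ((prefixes.foldl (fun acc p => acc.insert p []) PySem.Dict.empty :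
      PySem.Dict String (List String)).getD p []) = [] :=
    pk0_getD prefixes PySem.Dict.empty (fun q => by simp [PySem.Dict.getD_empty])
  simp only [groups_fst, groups_snd, hpk, List.nil_append,
    foldl_nested_eq_flatMap pvMoveToEnd, ← List.foldl_append]
  set dd : PySem.Dict String String := PySem.Dict.ofList d with hdd
  have hnd : dd.keys.Nodup := PySem.Dict.nodup_keys_ofList d
  set LA := prefixes.flatMap
      (fun p => dd.keys.filter (fun k => pvFirstPrefix prefixes k == some p))
    ++ dd.keys.filter (fun k => (pvFirstPrefix prefixes k).isNone) with hLA
  set LB := PySem.List.sorted dd.keys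
      (pvRank (pvPosDict prefixes) (prefixes.length : Int) prefixes) with hLB
  have hmemA : ∀ k ∈ LA, k ∈ dd.keys := by
    intro k hk
    rcases List.mem_append.mp hk with hk | hk
    · obtain ⟨p, _, hkf⟩ := List.mem_flatMap.mp hk
      exact (List.mem_filter.mp hkf).1
    · exact (List.mem_filter.mp hk).1
  have hmemB : ∀ k ∈ LB, k ∈ dd.keys := by
    intro k hk
    exact (PySem.List.mem_sorted _ _ _ k).mp hk
  have hcovA : dd.items.filter (fun p => !(LA.contains p.1)) = [] := by
    rw [List.filter_eq_nil_iff]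
    intro p hp
    have hpk : p.1 ∈ dd.keys := List.mem_map.mpr ⟨p, hp, rfl⟩
    have hmem : p.1 ∈ LA := by
      rw [hLA]
      cases hfp : pvFirstPrefix prefixes p.1 with
      | none =>
        refine List.mem_append.mpr (Or.inr ?_)
        rw [List.mem_filter]
        exact ⟨hpk, by simp [hfp]⟩
      | some q =>
        refine List.mem_append.mpr (Or.inl (List.mem_flatMap.mpr
          ⟨q, pvFirstPrefix_mem prefixes p.1 q hfp, ?_⟩))
        rw [List.mem_filter]
        exact ⟨hpk, by simp [hfp]⟩
    simp [hmem]
  have hcovB : dd.items.filter (fun p => !(LB.contains p.1)) = [] := by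
    rw [List.filter_eq_nil_iff]
    intro p hp
    have hpk : p.1 ∈ dd.keys := List.mem_map.mpr ⟨p, hp, rfl⟩
    have hmem : p.1 ∈ LB := by
      rw [hLB, PySem.List.mem_sorted]
      exact hpk
    simp [hmem]
  rw [foldl_move_items dd hnd LA hmemA, foldl_move_items dd hnd LB hmemB,
    hcovA, hcovB, List.nil_append, List.nil_append]
  have hndB : LB.Nodup := ((PySem.List.sorted_perm dd.keys _ false).nodup_iff).mpr hnd
  rw [pvDedupLast_of_nodup LB hndB, hLA,
    key_order_eq prefixes dd.keys hnd]
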